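-- pv_equiv track=rewrite | github.com/Ente56298/CO-RA_Ecosistema_Cognitivo_Inclusivo | cora_quantum_assistant/core/token_minimization.py | _add_error_correction
-- ===== SOURCE A (Python) =====
-- from typing import Dict, List, Tuple, Optional, Any, Set
--
-- def _add_error_correction(sequence: List[str]) -> List[str]:
--     """Agrega operaciones de corrección de errores"""
--     # Insertar corrección de errores periódicamente
--     optimized = []
--     error_correction_interval = 5
--
--     for i, op in enumerate(sequence):
--         optimized.append(op)
--
--         # Agregar corrección de errores cada N operaciones
--         if (i + 1) % error_correction_interval == 0:
--             optimized.append("apply_error_correction()")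
--
--     return optimized
-- ===== SOURCE B (Python) =====
-- from typing import List
--
-- def _add_error_correction(sequence: List[str]) -> List[str]:
--     """Agrega operaciones de correccion de errores (chunked rewrite)."""
--     optimized = []
--     for i in range(0, len(sequence), 5):
--         chunk = sequence[i:i + 5]
--         optimized.extend(chunk)
--         if len(chunk) == 5:
--             optimized.append("apply_error_correction()")
--     return optimized
-- ===== Notes on version B (the rewrite author's own statement) =====
-- stated objective: simpler
-- what changed: Replaces the per-element enumerate-and-modulo counter with a chunked traversal in blocks of five: each full chunk is extended and followed by one marker, a trailing partial chunk gets none.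
import Mathlib
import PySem

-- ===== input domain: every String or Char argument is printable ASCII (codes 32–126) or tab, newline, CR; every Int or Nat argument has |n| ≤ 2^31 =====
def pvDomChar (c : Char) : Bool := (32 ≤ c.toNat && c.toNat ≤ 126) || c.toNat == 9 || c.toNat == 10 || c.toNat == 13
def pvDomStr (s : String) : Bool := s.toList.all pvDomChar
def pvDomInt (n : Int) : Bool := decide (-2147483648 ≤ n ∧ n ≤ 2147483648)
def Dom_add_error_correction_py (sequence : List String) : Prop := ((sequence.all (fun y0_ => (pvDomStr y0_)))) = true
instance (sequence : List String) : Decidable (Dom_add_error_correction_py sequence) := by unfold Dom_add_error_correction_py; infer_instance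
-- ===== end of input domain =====

-- B changes the decomposition: blocks of five with one marker per full block, instead of A's per-element counter; same O(n) cost.

-- ===== PORT A =====
-- port of: for i, op in enumerate(sequence): append op; if (i+1) % 5 == 0: append marker
def add_error_correction_py (sequence : List String) : List String :=
  let error_correction_interval : Int := 5
  (PySem.List.enumerate sequence).foldl
    (fun optimized p =>
      let optimized := optimized ++ [p.2]
      if PySem.Int.mod (p.1 + 1) error_correction_interval == 0 then
        optimized ++ ["apply_error_correction()"]
      else optimized)
    []

-- ===== PORT B =====
-- port of: for i in range(0, len(sequence), 5): chunk = sequence[i:i+5]; extend; if len(chunk) == 5: append marker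
-- (the range-stepping loop is transcribed as recursion consuming five elements per step)
def add_error_correction_py_alt (sequence : List String) : List String :=
  match sequence with
  | [] => []
  | x :: xs =>
    let chunk := (x :: xs).take 5
    chunk ++ (if chunk.length = 5 then ["apply_error_correction()"] else []) ++
      add_error_correction_py_alt ((x :: xs).drop 5)
termination_by sequence.length
decreasing_by simp [List.length_drop]

-- ===== PRECONDITION & SPEC =====
def Spec_add_error_correction_py (sequence : List String) (out : List String) : Prop := out = add_error_correction_py_alt sequence
instance (sequence : List String) (out : List String) : Decidable (Spec_add_error_correction_py sequence out) := by unfold Spec_add_error_correction_py; infer_instance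

-- ===== CLAIM (what is proved, stated in full; the proofs are below) =====
def Claim_equal_add_error_correction_py : Prop := ∀ (sequence : List String), Dom_add_error_correction_py sequence → Spec_add_error_correction_py sequence (add_error_correction_py sequence)

-- ===== LEMMAS AND PROOFS =====

-- A's loop body, written as a structural recursion carrying the running index i.
def pvA (i : Int) : List String → List String
  | [] => []
  | x :: xs =>
    if PySem.Int.mod (i + 1) 5 == 0 then
      x :: "apply_error_correction()" :: pvA (i + 1) xs
    else
      x :: pvA (i + 1) xs

theorem pvA_foldl (s : List String) : ∀ (i : Int) (acc : List String),
    (PySem.List.enumerate s i).foldl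
      (fun optimized p =>
        let optimized := optimized ++ [p.2]
        if PySem.Int.mod (p.1 + 1) 5 == 0 then
          optimized ++ ["apply_error_correction()"]
        else optimized)
      acc = acc ++ pvA i s := by
  induction s with
  | nil => intro i acc; simp [PySem.List.enumerate_nil, pvA]
  | cons x xs ih =>
    intro i acc
    rw [PySem.List.enumerate_cons, List.foldl_cons, ih, pvA]
    by_cases h : (5 : Int) ∣ i + 1 <;> simp [h]

theorem pvA_eq_alt (n : Nat) : ∀ (s : List String), s.length = n → ∀ (i : Int), 0 ≤ i →
    PySem.Int.mod i 5 = 0 → pvA i s = add_error_correction_py_alt s := by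
  induction n using Nat.strong_induction_on with
  | _ n IH =>
  intro s hs i hi h0
  have hm : i % 5 = 0 := by
    simpa [PySem.Int.mod_eq_emod_of_pos (a := i) (b := 5) (by norm_num)] using h0
  have d1 : ¬ (5 : Int) ∣ i + 1 := by omega
  have d2 : ¬ (5 : Int) ∣ i + 1 + 1 := by omega
  have d3 : ¬ (5 : Int) ∣ i + 1 + 1 + 1 := by omega
  have d4 : ¬ (5 : Int) ∣ i + 1 + 1 + 1 + 1 := by omega
  have d5 : (5 : Int) ∣ i + 1 + 1 + 1 + 1 + 1 := by omega
  have h5 : PySem.Int.mod (i + 5) 5 = 0 := by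
    rw [PySem.Int.mod_eq_emod_of_pos (by norm_num)]; omega
  match s, hs with
  | [], _ => simp [pvA, add_error_correction_py_alt]
  | [a], _ =>
    simp [pvA, add_error_correction_py_alt, d1]
  | [a, b], _ =>
    simp [pvA, add_error_correction_py_alt, d1, d2]
  | [a, b, c], _ =>
    simp [pvA, add_error_correction_py_alt, d1, d2, d3]
  | [a, b, c, d], _ =>
    simp [pvA, add_error_correction_py_alt, d1, d2, d3, d4]
  | a :: b :: c :: d :: e :: t, hs =>
    have ih' := IH t.length (by simp at hs; omega) t rfl (i + 5) (by omega) h5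
    rw [show i + 5 = i + 1 + 1 + 1 + 1 + 1 by ring] at ih'
    rw [add_error_correction_py_alt]
    simp [pvA, d1, d2, d3, d4, d5, ih']

-- ===== VERDICT (by name: the statement is the Claim_ definition above) =====
theorem add_error_correction_py_spec : Claim_equal_add_error_correction_py := by
  intro s _
  unfold Spec_add_error_correction_py add_error_correction_py
  simp only []
  have := pvA_foldl s 0 []
  simpa using this.trans (by simp [pvA_eq_alt s.length s rfl 0 (by norm_num) (by decide)])
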